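-- pv_equiv track=rewrite | github.com/yechankun/Algorithm | programmers/pg_level3_4_실패_첫시도.py | solution
-- ===== SOURCE A (Python) =====
-- def solution(a):
--     answer = 0
--     flag=0
--
--     for idx, i in enumerate(a):
--         try:
--             if i>min(a[idx+1:]):
--                 flag+=1
--             if i>min(a[:idx]):
--                 flag+=1
--         except:
--             flag=0
--             continue
--         if flag==2:
--             answer+=1
--         flag=0
--
--     return len(a)-answer
-- ===== SOURCE B (Python) =====
-- def solution(a):
--     # O(n): running prefix minima and suffix minima, then one zip pass.
--     n = len(a)
--     pre = []
--     m = None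
--     for x in a:
--         m = x if m is None else min(m, x)
--         pre.append(m)
--     suf = []
--     m = None
--     for x in reversed(a):
--         m = x if m is None else min(m, x)
--         suf.append(m)
--     suf.reverse()
--     answer = 0
--     for x, p, s in zip(a[1:n - 1], pre[:n - 2], suf[2:]):
--         if x > p and x > s:
--             answer += 1
--     return n - answer
-- ===== Notes on version B (the rewrite author's own statement) =====
-- stated objective: faster
-- what changed: Replaced the per-index min() over both slices (quadratic rescans, with try/except skipping the two ends) by precomputed running prefix-minimum and suffix-minimum lists and a single zip pass over the interior elements.
import Mathlib
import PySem

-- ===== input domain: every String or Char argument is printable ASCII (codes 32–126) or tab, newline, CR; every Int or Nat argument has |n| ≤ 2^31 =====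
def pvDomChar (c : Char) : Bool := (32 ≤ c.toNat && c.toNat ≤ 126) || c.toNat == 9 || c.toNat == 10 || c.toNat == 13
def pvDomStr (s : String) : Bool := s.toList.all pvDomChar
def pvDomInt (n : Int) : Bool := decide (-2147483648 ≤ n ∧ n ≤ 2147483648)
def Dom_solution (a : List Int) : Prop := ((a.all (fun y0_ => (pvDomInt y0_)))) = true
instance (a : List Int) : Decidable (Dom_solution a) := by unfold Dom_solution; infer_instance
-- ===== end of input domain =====

-- B replaces A's per-index min() over both slices (O(n^2)) by prefix/suffix running-minimum lists and one pass (O(n)); proved equal on all inputs.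


-- ===== PORT A =====
-- one loop iteration of A: try both min()s (none = ValueError, caught: flag=0, continue)
def pvStepA (a : List Int) (st : Int × Int) (p : Int × Int) : Int × Int :=
  match PySem.List.min? (PySem.List.slice a (some (p.1 + 1)) none) (fun v => v) with
  | none => (st.1, 0)
  | some m1 =>
    let flag := if p.2 > m1 then st.2 + 1 else st.2
    match PySem.List.min? (PySem.List.slice a none (some p.1)) (fun v => v) with
    | none => (st.1, 0)
    | some m2 =>
      let flag := if p.2 > m2 then flag + 1 else flag
      (if flag = 2 then st.1 + 1 else st.1, 0)

def solution (a : List Int) : Int :=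
  let res := (PySem.List.enumerate a 0).foldl (pvStepA a) (0, 0)
  (a.length : Int) - res.1

-- ===== PORT B =====
-- running minima, left to right (the 'm = x if m is None else min(m, x)' loop)
def pvRunMins (a : List Int) : List Int :=
  (a.foldl (fun (st : Option Int × List Int) x =>
    match st.1 with
    | none => (some x, st.2 ++ [x])
    | some m => (some (min m x), st.2 ++ [min m x])) (none, [])).2

def pvStepB (ans : Int) (q : Int × Int × Int) : Int :=
  if q.1 > q.2.1 ∧ q.1 > q.2.2 then ans + 1 else ans

def solution_alt (a : List Int) : Int :=
  let n : Int := a.length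
  let pre := pvRunMins a
  let suf := (pvRunMins a.reverse).reverse
  let answer := (List.zip (PySem.List.slice a (some 1) (some (n - 1)))
      (List.zip (PySem.List.slice pre none (some (n - 2))) (PySem.List.slice suf (some 2) none))).foldl
    pvStepB 0
  n - answer

-- ===== PRECONDITION & SPEC =====
def Spec_solution (a : List Int) (out : Int) : Prop := out = solution_alt a
instance (a : List Int) (out : Int) : Decidable (Spec_solution a out) := by unfold Spec_solution; infer_instance

-- ===== CLAIM (what is proved, stated in full; the proofs are below) =====
def Claim_equal_solution : Prop := ∀ (a : List Int), Dom_solution a → Spec_solution a (solution a)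

-- ===== LEMMAS AND PROOFS =====

-- prefix running minima of t, seeded with m (pre[k] = min of the seed and the first k+1 of t)
def pvPM (m : Int) : List Int → List Int
  | [] => []
  | y :: t => min m y :: pvPM (min m y) t

-- suffix minima (suf[k] = min of t.drop k)
def pvSufM : List Int → List Int
  | [] => []
  | y :: t => List.foldl min y t :: pvSufM t

-- the common count: om = min of the elements before the current suffix (none = no elements yet)
def pvCntM (om : Option Int) : List Int → Int
  | [] => 0
  | y :: t =>
    (match PySem.List.min? t (fun v => v), om with
     | some m1, some m2 => if m1 < y ∧ m2 < y then (1 : Int) else 0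
     | _, _ => 0) + pvCntM (some (match om with | none => y | some m => min m y)) t

theorem pvFoldMinSwap (v : List Int) (x y : Int) :
    List.foldl min (min x y) v = min (List.foldl min x v) y := by
  induction v generalizing x with
  | nil => rfl
  | cons z v ih =>
    simp only [List.foldl]
    rw [show min (min x y) z = min (min x z) y by
      rw [min_assoc, min_comm y z, ← min_assoc], ih]

theorem pvFoldMinRev (t : List Int) (x : Int) :
    List.foldl min x t.reverse = List.foldl min x t := by
  induction t generalizing x with
  | nil => rfl
  | cons y v ih =>
    simp only [List.reverse_cons, List.foldl_append, List.foldl, ih]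
    rw [← pvFoldMinSwap, min_comm x y]

theorem pvMinAppendSingleton (u : List Int) (x : Int) :
    PySem.List.min? (u ++ [x]) (fun v => v)
      = some (match PySem.List.min? u (fun v => v) with | none => x | some m => min m x) := by
  cases u with
  | nil => simp [PySem.List.min?]
  | cons p ps =>
    rw [List.cons_append, PySem.List.min?_id_cons, PySem.List.min?_id_cons]
    simp [List.foldl_append]

theorem pvRunMinsAux (t : List Int) : ∀ (m : Int) (acc : List Int),
    t.foldl (fun (st : Option Int × List Int) x =>
      match st.1 with
      | none => (some x, st.2 ++ [x])
      | some m => (some (min m x), st.2 ++ [min m x])) (some m, acc)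
      = (some (List.foldl min m t), acc ++ pvPM m t) := by
  induction t with
  | nil => intro m acc; simp [pvPM]
  | cons y t ih => intro m acc; simp [List.foldl, pvPM, ih, List.append_assoc]

theorem pvRunMins_cons (x : Int) (t : List Int) :
    pvRunMins (x :: t) = x :: pvPM x t := by
  simp [pvRunMins, List.foldl, pvRunMinsAux]

theorem pvPM_append (ps : List Int) : ∀ (p x : Int),
    pvPM p (ps ++ [x]) = pvPM p ps ++ [min (List.foldl min p ps) x] := by
  induction ps with
  | nil => intro p x; rfl
  | cons q qs ih => intro p x; simp only [List.cons_append, pvPM, ih, List.foldl]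

theorem pvRunMins_append_singleton (u : List Int) (x : Int) :
    pvRunMins (u ++ [x]) = pvRunMins u ++
      [match PySem.List.min? u (fun v => v) with | none => x | some m => min m x] := by
  cases u with
  | nil => simp [pvRunMins, PySem.List.min?]
  | cons p ps =>
    rw [List.cons_append, pvRunMins_cons, pvRunMins_cons, PySem.List.min?_id_cons,
      pvPM_append]
    rfl

theorem pvSufM_eq (a : List Int) : (pvRunMins a.reverse).reverse = pvSufM a := by
  induction a with
  | nil => rfl
  | cons x t ih =>
    rw [List.reverse_cons, pvRunMins_append_singleton, List.reverse_append,
      List.reverse_singleton, List.singleton_append, ih, pvSufM]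
    congr 1
    cases ht : t.reverse with
    | nil => simp [List.reverse_eq_nil_iff.mp ht, PySem.List.min?]
    | cons c cs =>
      rw [PySem.List.min?_id_cons]
      have : t = (c :: cs).reverse := by rw [← ht, List.reverse_reverse]
      subst this
      simp only [List.reverse_reverse] at *
      rw [show List.foldl min x ((c :: cs).reverse) = List.foldl min x (c :: cs) from
        pvFoldMinRev (c :: cs) x]
      simp only [List.foldl]
      rw [min_comm x c, pvFoldMinSwap, min_comm _ x]

-- A's loop, processing suffix l after prefix pre of the full list a
theorem pvALoop (a : List Int) : ∀ (l pre : List Int) (ans : Int), a = pre ++ l →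
    (PySem.List.enumerate l (pre.length : Int)).foldl (pvStepA a) (ans, 0)
      = (ans + pvCntM (PySem.List.min? pre (fun v => v)) l, 0) := by
  intro l
  induction l with
  | nil => intro pre ans _; simp [PySem.List.enumerate_nil, pvCntM]
  | cons x suf ih =>
    intro pre ans ha
    rw [PySem.List.enumerate_cons, List.foldl_cons]
    have hsl : PySem.List.slice a (some ((pre.length : Int) + 1)) none = suf := by
      rw [PySem.List.slice_from a (by positivity), ha,
        show pre ++ x :: suf = (pre ++ [x]) ++ suf by simp,
        show ((pre.length : Int) + 1).toNat = (pre ++ [x]).length by simp]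
      exact List.drop_left
    have htk : PySem.List.slice a none (some (pre.length : Int)) = pre := by
      rw [PySem.List.slice_to_natCast, ha, List.take_left]
    have hpre1 : ((pre ++ [x]).length : Int) = (pre.length : Int) + 1 := by simp
    have step : pvStepA a (ans, 0) ((pre.length : Int), x)
        = ((ans + match PySem.List.min? suf (fun v => v), PySem.List.min? pre (fun v => v) with
            | some m1, some m2 => if m1 < x ∧ m2 < x then (1 : Int) else 0
            | _, _ => 0), 0) := by
      simp only [pvStepA, hsl, htk]
      cases h1 : PySem.List.min? suf (fun v => v) with
      | none => simp
      | some m1 =>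
        cases h2 : PySem.List.min? pre (fun v => v) with
        | none => simp
        | some m2 =>
          simp only [gt_iff_lt]
          by_cases c1 : m1 < x <;> by_cases c2 : m2 < x <;>
            simp [c1, c2]
    rw [step, show ((pre.length : Int) + 1) = ((pre ++ [x]).length : Int) from hpre1.symm,
      ih (pre ++ [x]) _ (by simp [ha]), pvMinAppendSingleton]
    simp only [pvCntM, Prod.mk.injEq]
    refine ⟨?_, trivial⟩
    cases h1 : PySem.List.min? suf (fun v => v) with
    | none => cases PySem.List.min? pre (fun v => v) <;> simp
    | some m1 => cases PySem.List.min? pre (fun v => v) <;> simp [add_assoc]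

-- B's single zip pass equals the common count (m = min of the elements left of t)
theorem pvZip (t : List Int) : ∀ (m ans : Int),
    (List.zip t.dropLast (List.zip ((m :: pvPM m t).take (t.length - 1)) ((pvSufM t).drop 1))).foldl
      pvStepB ans = ans + pvCntM (some m) t := by
  induction t with
  | nil => intro m ans; simp [pvCntM]
  | cons y rest ih =>
    intro m ans
    cases rest with
    | nil => simp [pvCntM, PySem.List.min?]
    | cons z r =>
      have hT : (y :: z :: r).dropLast = y :: (z :: r).dropLast := rfl
      have hP : (m :: pvPM m (y :: z :: r)).take ((y :: z :: r).length - 1)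
          = m :: (min m y :: pvPM (min m y) (z :: r)).take ((z :: r).length - 1) := by
        simp only [pvPM, List.length_cons, Nat.add_sub_cancel, List.take_succ_cons]
      have hS : (pvSufM (y :: z :: r)).drop 1
          = List.foldl min z r :: (pvSufM (z :: r)).drop 1 := rfl
      rw [hT, hP, hS, List.zip_cons_cons, List.zip_cons_cons, List.foldl_cons]
      have hstep : pvStepB ans (y, m, List.foldl min z r)
          = ans + (if List.foldl min z r < y ∧ m < y then (1 : Int) else 0) := by
        simp only [pvStepB, gt_iff_lt]
        by_cases c1 : m < y <;> by_cases c2 : List.foldl min z r < y <;>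
          simp [c1, c2]
      rw [hstep, ih (min m y)]
      rw [show pvCntM (some m) (y :: z :: r)
          = (if List.foldl min z r < y ∧ m < y then (1 : Int) else 0)
            + pvCntM (some (min m y)) (z :: r) by
        simp only [pvCntM, PySem.List.min?_id_cons]]
      ring

theorem solution_eq_cnt (a : List Int) :
    solution a = (a.length : Int) - pvCntM none a := by
  have h := pvALoop a a [] 0 rfl
  simp only [List.length_nil, Nat.cast_zero, PySem.List.min?, List.foldl_nil, zero_add] at h
  simp only [solution, h]

-- ===== VERDICT (by name: the statement is the Claim_ definition above) =====
theorem solution_spec : Claim_equal_solution := by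
  intro a _
  unfold Spec_solution
  rw [solution_eq_cnt]
  cases a with
  | nil => rfl
  | cons x t =>
    cases t with
    | nil =>
      simp [solution_alt, pvCntM, PySem.List.min?, PySem.List.slice, PySem.List.clampIdx]
    | cons y r =>
      have hn : ((x :: y :: r).length : Int) = (r.length : Int) + 2 := by push_cast [List.length_cons]; ring
      simp only [solution_alt]
      rw [hn]
      have hx : PySem.List.slice (x :: y :: r) (some 1) (some ((r.length : Int) + 2 - 1))
          = (y :: r).dropLast := by
        rw [PySem.List.slice_toNat _ (by omega) (by omega)]
        simp only [show ((1 : Int)).toNat = 1 from rfl]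
        rw [show ((r.length : Int) + 2 - 1).toNat = r.length + 1 by omega]
        rw [show (x :: y :: r).drop 1 = y :: r from rfl]
        rw [List.dropLast_eq_take]
        simp
      have hp : PySem.List.slice (pvRunMins (x :: y :: r)) none (some ((r.length : Int) + 2 - 2))
          = (x :: pvPM x (y :: r)).take ((y :: r).length - 1) := by
        rw [PySem.List.slice_to _ (by omega), pvRunMins_cons]
        congr 1
        simp
      have hs : PySem.List.slice ((pvRunMins (x :: y :: r).reverse).reverse) (some 2) none
          = (pvSufM (y :: r)).drop 1 := by
        rw [PySem.List.slice_from _ (by omega), pvSufM_eq]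
        rfl
      rw [hx, hp, hs, pvZip (y :: r) x 0]
      simp only [pvCntM, PySem.List.min?_id_cons, zero_add]
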